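-- pv_equiv track=rewrite | github.com/dacrystal/scriptcast | scriptcast/shell/zsh.py | _decode_ansi_c_body
-- ===== SOURCE A (Python) =====
-- _SIMPLE_ESCAPES = {
--     'n': '\n', 'r': '\r', 't': '\t', 'a': '\a',
--     'b': '\b', 'f': '\f', 'v': '\v', "'": "'", '\\': '\\',
-- }
--
-- def _decode_ansi_c_body(body: str) -> str:
--     """Decode the interior of a $'...' ANSI-C quoted string as produced by zsh xtrace."""
--     out: list[str] = []
--     i = 0
--     while i < len(body):
--         ch = body[i]
--         if ch != '\\' or i + 1 >= len(body):
--             out.append(ch)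
--             i += 1
--             continue
--         nxt = body[i + 1]
--         if nxt in _SIMPLE_ESCAPES:
--             out.append(_SIMPLE_ESCAPES[nxt])
--             i += 2
--         elif nxt in ('e', 'E'):
--             out.append('\x1b')
--             i += 2
--         elif nxt in ('C', 'c') and i + 3 < len(body) and body[i + 2] == '-':
--             # \C-X → Ctrl+X; e.g. \C-[ → chr(91-64) = chr(27) = ESC
--             code = ord(body[i + 3].upper()) - 64
--             if 0 <= code <= 127:
--                 out.append(chr(code))
--                 i += 4
--             else:
--                 out.append('\\')
--                 out.append(nxt)
--                 i += 2
--         elif nxt == 'x':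
--             hex_str = body[i + 2:i + 4]
--             if len(hex_str) == 2 and all(c in '0123456789abcdefABCDEF' for c in hex_str):
--                 out.append(chr(int(hex_str, 16)))
--                 i += 4
--             else:
--                 out.append('\\')
--                 out.append(nxt)
--                 i += 2
--         elif nxt in '01234567':
--             j = i + 1
--             while j < len(body) and j < i + 4 and body[j] in '01234567':
--                 j += 1
--             out.append(chr(int(body[i + 1:j], 8)))
--             i = j
--         else:
--             out.append('\\')
--             out.append(nxt)
--             i += 2
--     return ''.join(out)
-- ===== SOURCE B (Python) =====
-- import re
--
-- _SIMPLE_ESCAPES = {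
--     'n': '\n', 'r': '\r', 't': '\t', 'a': '\a',
--     'b': '\b', 'f': '\f', 'v': '\v', "'": "'", '\\': '\\',
-- }
--
-- # One ordered alternation mirroring the escape grammar; earlier alternatives win.
-- _ESCAPE_RE = re.compile(
--     r"\\[nrtabfv'\\]"          # simple escapes
--     r"|\\[eE]"                 # ESC
--     r"|\\[Cc]-[\s\S]"          # ctrl escape \C-X (needs a char after '-')
--     r"|\\[Cc]"                 # \C / \c without a valid '-X' tail
--     r"|\\x[0-9a-fA-F]{2}"      # \xHH
--     r"|\\x"                    # \x without two hex digits
--     r"|\\[0-7]{1,3}"           # octal, greedy up to 3 digits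
--     r"|\\[\s\S]"               # any other escaped char, kept verbatim
--     r"|[\s\S]"                 # a lone char (incl. a trailing backslash)
-- )
--
-- def _decode_one(m: "re.Match") -> str:
--     t = m.group(0)
--     if t[0] != '\\' or len(t) == 1:
--         return t
--     n = t[1]
--     if len(t) == 2 and n in _SIMPLE_ESCAPES:
--         return _SIMPLE_ESCAPES[n]
--     if n in 'eE':
--         return '\x1b'
--     if n in 'Cc':
--         if len(t) == 4:
--             code = ord(t[3].upper()) - 64
--             return chr(code) if 0 <= code <= 127 else t
--         return t
--     if n == 'x':
--         return chr(int(t[2:], 16)) if len(t) == 4 else t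
--     if n in '01234567':
--         return chr(int(t[1:], 8))
--     return t
--
-- def _decode_ansi_c_body(body: str) -> str:
--     """Decode the interior of a $'...' ANSI-C quoted string as produced by zsh xtrace."""
--     return _ESCAPE_RE.sub(_decode_one, body)
-- ===== Notes on version B (the rewrite author's own statement) =====
-- stated objective: idiomatic
-- what changed: Replaces the hand-rolled index-stepping while loop with a single compiled regex whose ordered alternation captures each escape form and a re.sub callback that decodes the matched token.
import Mathlib
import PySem

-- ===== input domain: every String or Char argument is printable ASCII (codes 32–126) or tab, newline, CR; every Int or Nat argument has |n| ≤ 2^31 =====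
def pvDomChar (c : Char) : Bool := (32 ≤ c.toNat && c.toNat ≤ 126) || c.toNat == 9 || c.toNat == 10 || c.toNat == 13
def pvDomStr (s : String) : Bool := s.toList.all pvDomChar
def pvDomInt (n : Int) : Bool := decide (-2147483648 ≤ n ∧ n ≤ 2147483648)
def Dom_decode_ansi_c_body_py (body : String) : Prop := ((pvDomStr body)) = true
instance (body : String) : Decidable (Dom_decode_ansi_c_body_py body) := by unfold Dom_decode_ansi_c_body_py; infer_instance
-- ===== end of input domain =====

-- B replaces A's hand-rolled index-stepping while loop by a single ordered-alternation
-- regex (tokenizer) with a decoding callback; not faster, just the idiomatic re.sub shape.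

-- shared module-level constants (_SIMPLE_ESCAPES and the character classes both Pythons use)
def pvSimple : PySem.Dict Char Char := PySem.Dict.ofList
  [('n', Char.ofNat 10), ('r', Char.ofNat 13), ('t', Char.ofNat 9), ('a', Char.ofNat 7),
   ('b', Char.ofNat 8), ('f', Char.ofNat 12), ('v', Char.ofNat 11), ('\'', '\''), ('\\', '\\')]
def pvOct : List Char := ['0','1','2','3','4','5','6','7']
def pvHex : List Char := ['0','1','2','3','4','5','6','7','8','9','a','b','c','d','e','f','A','B','C','D','E','F']

-- ===== PORT A =====
-- the inner `while j < len(body) and j < i+4 and body[j] in '01234567'` loop: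
-- take up to k more octal digits, returning (digits, remainder)
def pvTakeOct : Nat → List Char → (List Char × List Char)
  | 0, cs => ([], cs)
  | _ + 1, [] => ([], [])
  | k + 1, c :: cs =>
    if c ∈ pvOct then
      let p := pvTakeOct k cs
      (c :: p.1, p.2)
    else ([], c :: cs)

theorem pvTakeOct_snd_length (k : Nat) (cs : List Char) : (pvTakeOct k cs).2.length ≤ cs.length := by
  induction k generalizing cs with
  | zero => simp [pvTakeOct]
  | succ k ih =>
    cases cs with
    | nil => simp [pvTakeOct]
    | cons c cs =>
      simp only [pvTakeOct]
      split
      · exact Nat.le_succ_of_le (ih cs)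
      · simp

-- A's while loop over the remaining suffix; `out` is A's accumulator list, indices become suffixes
-- (body[i] = ch, body[i+1] = nxt, …).  chr(int(s, 16/8)) is ported via PySem.Int.ofCharsBase?
-- (the guards guarantee a valid numeral) and Char.ofNat (codes here are ≤ 511, valid scalars);
-- body[i+3].upper() is PySem.Chars.upperChar (exact for the ASCII domain).
def pvALoop (out : List Char) : List Char → List Char
  | [] => out
  | ch :: rest =>
    if ch ≠ '\\' ∨ rest = [] then pvALoop (out ++ [ch]) rest
    else
      match rest with
      | [] => out   -- unreachable: rest ≠ []
      | nxt :: rest2 =>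
        if (pvSimple.get? nxt).isSome then
          pvALoop (out ++ [(pvSimple.get? nxt).getD nxt]) rest2
        else if nxt = 'e' ∨ nxt = 'E' then
          pvALoop (out ++ [Char.ofNat 27]) rest2
        else if nxt = 'C' ∨ nxt = 'c' then
          -- python's compound elif condition also needs body[i+2] == '-' and i+3 < len;
          -- when that part fails, 'C'/'c' match no later elif, landing in the final else
          match hm : rest2 with
          | '-' :: x :: rest3 =>
            let code : Int := ((PySem.Chars.upperChar x).toNat : Int) - 64
            if 0 ≤ code ∧ code ≤ 127 then
              pvALoop (out ++ [Char.ofNat code.toNat]) rest3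
            else
              pvALoop (out ++ ['\\', nxt]) ('-' :: x :: rest3)
          | _ => pvALoop (out ++ ['\\', nxt]) rest2
        else if nxt = 'x' then
          -- hex_str = body[i+2:i+4]; len == 2 ∧ all hex
          match hx : rest2 with
          | h1 :: h2 :: rest3 =>
            if h1 ∈ pvHex ∧ h2 ∈ pvHex then
              pvALoop (out ++ [Char.ofNat ((PySem.Int.ofCharsBase? [h1, h2] 16).getD 0).toNat]) rest3
            else
              pvALoop (out ++ ['\\', nxt]) rest2
          | _ => pvALoop (out ++ ['\\', nxt]) rest2
        else if nxt ∈ pvOct then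
          let p := pvTakeOct 2 rest2
          pvALoop (out ++ [Char.ofNat ((PySem.Int.ofCharsBase? (nxt :: p.1) 8).getD 0).toNat]) p.2
        else
          pvALoop (out ++ ['\\', nxt]) rest2
termination_by cs => cs.length
decreasing_by
  all_goals simp_all
  all_goals try omega
  all_goals have := pvTakeOct_snd_length 2 rest2; omega

def decode_ansi_c_body_py (body : String) : String := String.ofList (pvALoop [] body.toList)

-- ===== PORT B =====
-- Source B = one compiled regex (an ORDERED alternation of the escape forms) applied with re.sub.
-- pvBMatch is that alternation tried at the current position: it returns (matched token, rest);
-- the trailing '[\s\S]' catch-all makes it total.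
def pvBMatch (c : Char) (cs : List Char) : List Char × List Char :=
  if c ≠ '\\' then ([c], cs)       -- alternatives 1–8 all start with '\'; alternative 9: lone char
  else
    match cs with
    | [] => ([c], [])              -- trailing backslash: only the lone-char alternative matches
    | n :: r =>
      if n ∈ ['n','r','t','a','b','f','v','\'','\\'] then (['\\', n], r)        -- \[nrtabfv'\]
      else if n = 'e' ∨ n = 'E' then (['\\', n], r)                             -- \[eE]
      else if n = 'C' ∨ n = 'c' then
        match r with
        | '-' :: x :: r2 => (['\\', n, '-', x], r2)                             -- \[Cc]-[\s\S]
        | _ => (['\\', n], r)                                                   -- \[Cc]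
      else if n = 'x' then
        match r with
        | h1 :: h2 :: r2 =>
          if h1 ∈ pvHex ∧ h2 ∈ pvHex then (['\\', n, h1, h2], r2)               -- \x[0-9a-fA-F]{2}
          else (['\\', n], r)                                                   -- \x
        | _ => (['\\', n], r)
      else if n ∈ pvOct then                                                    -- \[0-7]{1,3} greedy
        match r with
        | d2 :: d3 :: r2 =>
          if d2 ∈ pvOct then
            if d3 ∈ pvOct then (['\\', n, d2, d3], r2) else (['\\', n, d2], d3 :: r2)
          else (['\\', n], d2 :: d3 :: r2)
        | [d2] => if d2 ∈ pvOct then (['\\', n, d2], []) else (['\\', n], [d2])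
        | [] => (['\\', n], [])
      else (['\\', n], r)                                                       -- \[\s\S]

-- _decode_one: the re.sub callback, decoding one matched token t
def pvDecodeOne (t : List Char) : List Char :=
  match t with
  | [] => []
  | c :: rest =>
    if c ≠ '\\' ∨ rest = [] then t                                 -- t[0] != '\\' or len(t) == 1
    else
      match rest with
      | [] => t
      | n :: r2 =>
        if r2 = [] ∧ (pvSimple.get? n).isSome then [(pvSimple.get? n).getD n]
        else if n = 'e' ∨ n = 'E' then [Char.ofNat 27]
        else if n = 'C' ∨ n = 'c' then
          match r2 with
          | [_, x] =>                                              -- len(t) == 4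
            let code : Int := ((PySem.Chars.upperChar x).toNat : Int) - 64
            if 0 ≤ code ∧ code ≤ 127 then [Char.ofNat code.toNat] else t
          | _ => t
        else if n = 'x' then
          match r2 with
          | [h1, h2] => [Char.ofNat ((PySem.Int.ofCharsBase? [h1, h2] 16).getD 0).toNat]
          | _ => t
        else if n ∈ pvOct then [Char.ofNat ((PySem.Int.ofCharsBase? (n :: r2) 8).getD 0).toNat]
        else t

theorem pvBMatch_snd_length (c : Char) (cs : List Char) : (pvBMatch c cs).2.length ≤ cs.length := by
  unfold pvBMatch
  repeat' split
  all_goals simp_all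
  all_goals omega

-- _ESCAPE_RE.sub(_decode_one, body): scan left to right, decode each matched token
def pvBScan : List Char → List Char
  | [] => []
  | c :: cs =>
    let p := pvBMatch c cs
    pvDecodeOne p.1 ++ pvBScan p.2
termination_by cs => cs.length
decreasing_by
  have := pvBMatch_snd_length c cs
  simp
  omega

def decode_ansi_c_body_py_alt (body : String) : String := String.ofList (pvBScan body.toList)

-- ===== PRECONDITION & SPEC =====
def Spec_decode_ansi_c_body_py (body : String) (out : String) : Prop := out = decode_ansi_c_body_py_alt body
instance (body : String) (out : String) : Decidable (Spec_decode_ansi_c_body_py body out) := by unfold Spec_decode_ansi_c_body_py; infer_instance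

-- ===== CLAIM (what is proved, stated in full; the proofs are below) =====
def Claim_equal_decode_ansi_c_body_py : Prop := ∀ (body : String), Dom_decode_ansi_c_body_py body → Spec_decode_ansi_c_body_py body (decode_ansi_c_body_py body)

-- ===== LEMMAS AND PROOFS =====

theorem pvSimple_isSome_iff (n : Char) :
    ((pvSimple.get? n).isSome = true) ↔ n ∈ ['n','r','t','a','b','f','v','\'','\\'] := by
  have hd : pvSimple = PySem.Dict.mk
      [('n', Char.ofNat 10), ('r', Char.ofNat 13), ('t', Char.ofNat 9), ('a', Char.ofNat 7),
       ('b', Char.ofNat 8), ('f', Char.ofNat 12), ('v', Char.ofNat 11), ('\'', '\''), ('\\', '\\')] := by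
    decide
  rw [hd]
  by_cases h1 : n = 'n'
  · subst h1; decide
  by_cases h2 : n = 'r'
  · subst h2; decide
  by_cases h3 : n = 't'
  · subst h3; decide
  by_cases h4 : n = 'a'
  · subst h4; decide
  by_cases h5 : n = 'b'
  · subst h5; decide
  by_cases h6 : n = 'f'
  · subst h6; decide
  by_cases h7 : n = 'v'
  · subst h7; decide
  by_cases h8 : n = '\''
  · subst h8; decide
  by_cases h9 : n = '\\'
  · subst h9; decide
  have g1 : ('n' == n) = false := beq_eq_false_iff_ne.mpr (Ne.symm h1)
  have g2 : ('r' == n) = false := beq_eq_false_iff_ne.mpr (Ne.symm h2)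
  have g3 : ('t' == n) = false := beq_eq_false_iff_ne.mpr (Ne.symm h3)
  have g4 : ('a' == n) = false := beq_eq_false_iff_ne.mpr (Ne.symm h4)
  have g5 : ('b' == n) = false := beq_eq_false_iff_ne.mpr (Ne.symm h5)
  have g6 : ('f' == n) = false := beq_eq_false_iff_ne.mpr (Ne.symm h6)
  have g7 : ('v' == n) = false := beq_eq_false_iff_ne.mpr (Ne.symm h7)
  have g8 : ('\'' == n) = false := beq_eq_false_iff_ne.mpr (Ne.symm h8)
  have g9 : ('\\' == n) = false := beq_eq_false_iff_ne.mpr (Ne.symm h9)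
  simp [PySem.Dict.get?_mk_cons, PySem.Dict.get?, g1, g2, g3, g4, g5, g6, g7, g8, g9, h1, h2, h3, h4, h5, h6, h7, h8, h9]

theorem pvKey : ∀ (n : Nat) (cs : List Char), cs.length ≤ n → ∀ out, pvALoop out cs = out ++ pvBScan cs := by
  intro n
  induction n with
  | zero =>
    intro cs h out
    have : cs = [] := List.eq_nil_of_length_eq_zero (Nat.le_zero.mp h)
    subst this
    simp [pvALoop, pvBScan]
  | succ m ih =>
    intro cs h out
    match cs with
    | [] => simp [pvALoop, pvBScan]
    | c :: cs' =>
      simp only [List.length_cons, Nat.add_le_add_iff_right] at h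
      by_cases hc : c = '\\'
      case neg =>
        rw [pvALoop.eq_def]
        simp only [hc, ne_eq, not_false_iff, true_or, if_true]
        rw [ih cs' h]
        simp [pvBScan, pvBMatch, pvDecodeOne, hc]
      case pos =>
        subst hc
        match cs' with
        | [] => simp [pvALoop, pvBScan, pvBMatch, pvDecodeOne]
        | n1 :: r =>
          simp only [List.length_cons] at h
          by_cases hs : (pvSimple.get? n1).isSome = true
          · -- simple escape
            have hm := (pvSimple_isSome_iff n1).mp hs
            rw [pvALoop.eq_def]
            simp only [hs, if_true]
            rw [ih r (by omega)]
            simp [pvBScan, pvBMatch, pvDecodeOne, hm, hs]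
          · have hm : ¬ n1 ∈ ['n','r','t','a','b','f','v','\'','\\'] :=
              fun hmm => hs ((pvSimple_isSome_iff n1).mpr hmm)
            by_cases he : n1 = 'e' ∨ n1 = 'E'
            · -- \e / \E
              rw [pvALoop.eq_def]
              simp only [hs, he, if_true, if_false, Bool.false_eq_true, reduceIte]
              rw [ih r (by omega)]
              have hne : ¬ (n1 = 'C' ∨ n1 = 'c') := by rcases he with h | h <;> subst h <;> decide
              simp [pvBScan, pvBMatch, pvDecodeOne, hm, hs, he]
            · by_cases hC : n1 = 'C' ∨ n1 = 'c'
              · -- \\C / \\c: split on whether the '\\C-X' form is present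
                rw [pvALoop.eq_def]
                simp only [hs, he, hC, ne_eq, not_true_eq_false, Bool.false_eq_true, if_false,
                  if_true, reduceCtorEq, or_self, ite_true, ite_false]
                split
                next =>
                  rename_i x r3
                  by_cases hcode : (0 : Int) ≤ ((PySem.Chars.upperChar x).toNat : Int) - 64 ∧
                      ((PySem.Chars.upperChar x).toNat : Int) - 64 ≤ 127
                  · -- in range: both consume four characters
                    rw [if_pos hcode, ih r3 (by simp at h; omega)]
                    simp [pvBScan, pvBMatch, pvDecodeOne, hm, hs, he, hC]
                    rw [if_pos (by omega)]
                    simp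
                  · -- out of range: A re-reads '-' and X as literals; B keeps the token verbatim
                    have hx : x ≠ '\\' := by
                      intro hxx
                      subst hxx
                      exact hcode (by decide)
                    rw [if_neg hcode]
                    rw [show pvALoop (out ++ ['\\', n1]) ('-' :: x :: r3)
                          = pvALoop (out ++ ['\\', n1] ++ ['-']) (x :: r3) from by
                      rw [pvALoop.eq_def]; simp]
                    rw [show pvALoop (out ++ ['\\', n1] ++ ['-']) (x :: r3)
                          = pvALoop (out ++ ['\\', n1] ++ ['-'] ++ [x]) r3 from by
                      rw [pvALoop.eq_def]; simp [hx]]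
                    rw [ih r3 (by simp at h; omega)]
                    simp [pvBScan, pvBMatch, pvDecodeOne, hm, hs, he, hC]
                    rw [if_neg (by omega)]
                    simp
                next =>
                  rename_i hnodash
                  rw [ih r (by omega)]
                  simp only [pvBScan, pvBMatch]
                  simp only [hs, he, hC, hm, ne_eq, not_true_eq_false, Bool.false_eq_true,
                    if_false, if_true, reduceCtorEq, or_self, ite_true, ite_false,
                    List.mem_cons, not_false_eq_true, or_false, false_or]
                  simp [pvDecodeOne, hs, he, hC]
              · by_cases hxn : n1 = 'x'
                · -- \\xHH or bare \\x
                  subst hxn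
                  rcases r with _ | ⟨a1, _ | ⟨a2, r3⟩⟩
                  · rw [pvALoop.eq_def]
                    simp only [hs, he, hC, if_true, if_false, Bool.false_eq_true, reduceIte]
                    rw [ih [] (by simp)]
                    simp [pvBScan, pvBMatch, pvDecodeOne, hm, hs, he, hC]
                  · rw [pvALoop.eq_def]
                    simp only [hs, he, hC, if_true, if_false, Bool.false_eq_true, reduceIte]
                    rw [ih [a1] (by simp at h ⊢; omega)]
                    simp [pvBScan, pvBMatch, pvDecodeOne, hm, hs, he, hC]
                  · by_cases hhex : a1 ∈ pvHex ∧ a2 ∈ pvHex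
                    · rw [pvALoop.eq_def]
                      simp only [hs, he, hC, hhex, if_true, if_false, Bool.false_eq_true, reduceIte]
                      rw [ih r3 (by simp at h; omega)]
                      simp [pvBScan, pvBMatch, pvDecodeOne, hm, hs, he, hC, hhex]
                    · rw [pvALoop.eq_def]
                      simp only [hs, he, hC, hhex, if_true, if_false, Bool.false_eq_true, reduceIte]
                      rw [ih (a1 :: a2 :: r3) (by simp at h ⊢; omega)]
                      simp [pvBScan, pvBMatch, pvDecodeOne, hm, hs, he, hC, hhex]
                · by_cases ho : n1 ∈ pvOct
                  · -- octal: A's j-loop (pvTakeOct) ↔ B's greedy {1,3} alternative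
                    rcases r with _ | ⟨d2, _ | ⟨d3, r2⟩⟩
                    · rw [pvALoop.eq_def]
                      simp only [hs, he, hC, hxn, ho, if_true, if_false, Bool.false_eq_true, reduceIte]
                      rw [show pvTakeOct 2 ([] : List Char) = ([], []) from rfl]
                      rw [ih [] (by simp)]
                      simp [pvBScan, pvBMatch, pvDecodeOne, hm, hs, he, hC, hxn, ho]
                    · by_cases hd2 : d2 ∈ pvOct
                      · rw [pvALoop.eq_def]
                        simp only [hs, he, hC, hxn, ho, if_true, if_false, Bool.false_eq_true, reduceIte]
                        rw [show pvTakeOct 2 [d2] = ([d2], []) from by simp [pvTakeOct, hd2]]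
                        rw [ih [] (by simp)]
                        simp [pvBScan, pvBMatch, pvDecodeOne, hm, hs, he, hC, hxn, ho, hd2]
                      · rw [pvALoop.eq_def]
                        simp only [hs, he, hC, hxn, ho, if_true, if_false, Bool.false_eq_true, reduceIte]
                        rw [show pvTakeOct 2 [d2] = ([], [d2]) from by simp [pvTakeOct, hd2]]
                        rw [ih [d2] (by simp at h ⊢; omega)]
                        simp [pvBScan, pvBMatch, pvDecodeOne, hm, hs, he, hC, hxn, ho, hd2]
                    · by_cases hd2 : d2 ∈ pvOct
                      · by_cases hd3 : d3 ∈ pvOct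
                        · rw [pvALoop.eq_def]
                          simp only [hs, he, hC, hxn, ho, if_true, if_false, Bool.false_eq_true, reduceIte]
                          rw [show pvTakeOct 2 (d2 :: d3 :: r2) = ([d2, d3], r2) from by
                            simp [pvTakeOct, hd2, hd3]]
                          rw [ih r2 (by simp at h; omega)]
                          simp [pvBScan, pvBMatch, pvDecodeOne, hm, hs, he, hC, hxn, ho, hd2, hd3]
                        · rw [pvALoop.eq_def]
                          simp only [hs, he, hC, hxn, ho, if_true, if_false, Bool.false_eq_true, reduceIte]
                          rw [show pvTakeOct 2 (d2 :: d3 :: r2) = ([d2], d3 :: r2) from by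
                            simp [pvTakeOct, hd2, hd3]]
                          rw [ih (d3 :: r2) (by simp at h ⊢; omega)]
                          simp [pvBScan, pvBMatch, pvDecodeOne, hm, hs, he, hC, hxn, ho, hd2, hd3]
                      · rw [pvALoop.eq_def]
                        simp only [hs, he, hC, hxn, ho, if_true, if_false, Bool.false_eq_true, reduceIte]
                        rw [show pvTakeOct 2 (d2 :: d3 :: r2) = ([], d2 :: d3 :: r2) from by
                          simp [pvTakeOct, hd2]]
                        rw [ih (d2 :: d3 :: r2) (by simp at h ⊢; omega)]
                        simp [pvBScan, pvBMatch, pvDecodeOne, hm, hs, he, hC, hxn, ho, hd2]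
                  · -- final else: any other escaped char kept verbatim
                    rw [pvALoop.eq_def]
                    simp only [hs, he, hC, hxn, ho, if_true, if_false, Bool.false_eq_true, reduceIte]
                    rw [ih r (by omega)]
                    simp [pvBScan, pvBMatch, pvDecodeOne, hm, hs, he, hC, hxn, ho]

-- ===== VERDICT (by name: the statement is the Claim_ definition above) =====
theorem decode_ansi_c_body_py_spec : Claim_equal_decode_ansi_c_body_py := by
  intro body _
  unfold Spec_decode_ansi_c_body_py decode_ansi_c_body_py decode_ansi_c_body_py_alt
  rw [pvKey body.toList.length body.toList le_rfl []]
  simp
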